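-- pv_equiv track=rewrite | github.com/arkutils/Purlovia | export/wiki/stage_maps.py | _group_levels_by_directory
-- ===== SOURCE A (Python) =====
-- from typing import Any, Dict, Iterable, List, Optional, Set
--
-- def _group_levels_by_directory(assetnames: Iterable[str]) -> Dict[str, List[str]]:
--     '''
--     Takes an unsorted list of levels and groups them by directory.
--     '''
--     levels: Dict[str, Set[str]] = dict()
--
--     for assetname in assetnames:
--         path = assetname[:assetname.rfind('/')]
--         if path not in levels:
--             levels[path] = set()
--         levels[path].add(assetname)
--
--     return {path: list(sorted(names)) for path, names in levels.items()}
-- ===== SOURCE B (Python) =====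
-- def _group_levels_by_directory(assetnames):
--     '''
--     Takes an unsorted list of levels and groups them by directory.
--     '''
--     result = {}
--     for name in assetnames:
--         path = name[:name.rfind('/')]
--         bucket = result.get(path)
--         if bucket is None:
--             result[path] = [name]
--             continue
--         i = 0
--         while i < len(bucket) and bucket[i] < name:
--             i += 1
--         if i == len(bucket) or bucket[i] != name:
--             bucket.insert(i, name)
--     return result
-- ===== Notes on version B (the rewrite author's own statement) =====
-- stated objective: alternative
-- what changed: B drops A's dict-of-sets accumulation followed by a per-bucket sorted(set(...)) normalization pass, and instead keeps every bucket sorted and duplicate-free at all times: one pass that scans each name's position in its bucket and inserts it there (skipping duplicates), returning the dict as-is.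
import Mathlib
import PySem

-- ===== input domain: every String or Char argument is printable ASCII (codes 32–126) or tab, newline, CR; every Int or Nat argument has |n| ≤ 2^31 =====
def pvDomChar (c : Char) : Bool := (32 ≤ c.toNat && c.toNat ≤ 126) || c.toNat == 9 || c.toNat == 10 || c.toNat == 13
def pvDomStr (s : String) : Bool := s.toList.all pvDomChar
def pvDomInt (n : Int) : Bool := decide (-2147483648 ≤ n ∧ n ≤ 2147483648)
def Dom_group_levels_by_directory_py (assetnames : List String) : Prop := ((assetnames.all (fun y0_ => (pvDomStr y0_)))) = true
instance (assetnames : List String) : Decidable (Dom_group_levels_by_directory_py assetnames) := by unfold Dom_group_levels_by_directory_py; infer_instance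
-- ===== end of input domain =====

-- B replaces A's collect-sets-then-sort-each-bucket by an online single pass that keeps every bucket sorted and duplicate-free at all times, inserting each name at its position (alternative decomposition; return value only — B mutates its bucket lists in place where A builds fresh ones).


-- shared helper: assetname[:assetname.rfind('/')]
def pvDirOf (s : String) : String := PySem.Str.slice s none (some (PySem.Str.rfind s "/"))

-- ===== PORT A =====
def group_levels_by_directory_py (assetnames : List String) : List (String × List String) :=
  -- levels: Dict[str, Set[str]] built by the for-loop
  let levels : PySem.Dict String (PySem.Set String) :=
    assetnames.foldl
      (fun d assetname =>
        let path := pvDirOf assetname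
        -- if path not in levels: levels[path] = set()
        let d := if d.contains path then d else d.insert path PySem.Set.empty
        -- levels[path].add(assetname)  (in-place mutation of the stored set)
        d.modify path PySem.Set.empty (fun s => PySem.Set.add s assetname))
      PySem.Dict.empty
  -- {path: list(sorted(names)) for path, names in levels.items()}
  levels.items.map (fun p => (p.1, PySem.List.sorted p.2 (fun x => x) false))

-- ===== PORT B =====
-- the 'while i < len(bucket) and bucket[i] < name: i += 1' loop of Source B (same state i, same guard order)
def pvScan (bucket : List String) (name : String) (i : Nat) : Nat :=
  if h : i < bucket.length then
    (if bucket.getD i "" < name then pvScan bucket name (i + 1) else i)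
  else i
  termination_by bucket.length - i
  decreasing_by omega

def group_levels_by_directory_py_alt (assetnames : List String) : List (String × List String) :=
  (assetnames.foldl
    (fun d name =>
      let path := pvDirOf name
      -- bucket = result.get(path)
      match d.get? path with
      | none => d.insert path [name]          -- result[path] = [name]; continue
      | some bucket =>
        let i := pvScan bucket name 0
        -- if i == len(bucket) or bucket[i] != name: bucket.insert(i, name)  (in-place)
        if i == bucket.length || !(bucket.getD i "" == name)
        then d.insert path (PySem.List.insert bucket (i : Int) name)
        else d)
    PySem.Dict.empty).items

-- ===== PRECONDITION & SPEC =====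
def Spec_group_levels_by_directory_py (assetnames : List String) (out : List (String × List String)) : Prop := out = group_levels_by_directory_py_alt assetnames
instance (assetnames : List String) (out : List (String × List String)) : Decidable (Spec_group_levels_by_directory_py assetnames out) := by unfold Spec_group_levels_by_directory_py; infer_instance

-- ===== CLAIM (what is proved, stated in full; the proofs are below) =====
def Claim_equal_group_levels_by_directory_py : Prop := ∀ (assetnames : List String), Dom_group_levels_by_directory_py assetnames → Spec_group_levels_by_directory_py assetnames (group_levels_by_directory_py assetnames)

-- ===== LEMMAS AND PROOFS =====

-- the common normal form both programs reach: first-appearance directories, each with its sorted set of names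
def pvCanon (xs : List String) : List (String × List String) :=
  (PySem.Set.ofList (xs.map pvDirOf)).map
    (fun k => (k, PySem.List.sorted (PySem.Set.ofList (xs.filter (fun a => pvDirOf a == k))) (fun x => x) false))

-- A's loop body is a single Dict.modify
theorem pvStepA_eq_modify (d : PySem.Dict String (PySem.Set String)) (a : String) :
    (let p := pvDirOf a
     let d' := if d.contains p then d else d.insert p PySem.Set.empty
     d'.modify p PySem.Set.empty (fun s => PySem.Set.add s a))
    = d.modify (pvDirOf a) PySem.Set.empty (fun s => PySem.Set.add s a) := by
  simp only []
  by_cases h : d.contains (pvDirOf a) = true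
  · simp [h]
  · have hc : d.contains (pvDirOf a) = false := by simpa using h
    simp only [h, Bool.false_eq_true, if_false]
    simp only [PySem.Dict.modify, PySem.Dict.getD_insert_self, PySem.Dict.insert_insert_self]
    rw [PySem.Dict.getD_of_not_contains d _ hc]

-- value of A's fold at key p
theorem pvAfold_getD (l : List String) (d : PySem.Dict String (PySem.Set String)) (p : String) :
    (l.foldl (fun d a => d.modify (pvDirOf a) PySem.Set.empty (fun s => PySem.Set.add s a)) d).getD p PySem.Set.empty
    = PySem.Set.update (d.getD p PySem.Set.empty) (l.filter (fun a => pvDirOf a == p)) := by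
  induction l generalizing d with
  | nil => simp [PySem.Set.update]
  | cons a t ih =>
    simp only [List.foldl_cons, List.filter_cons, ih]
    by_cases h : pvDirOf a = p
    · simp [h, PySem.Dict.getD_modify_self, PySem.Set.update_cons]
    · simp [h, PySem.Dict.getD_modify_of_ne, Ne.symm h]

-- A equals the normal form
theorem pvA_canon (assetnames : List String) :
    group_levels_by_directory_py assetnames = pvCanon assetnames := by
  unfold group_levels_by_directory_py pvCanon
  have hstep : (List.foldl
      (fun d assetname =>
        let path := pvDirOf assetname
        let d := if d.contains path then d else d.insert path PySem.Set.empty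
        d.modify path PySem.Set.empty (fun s => PySem.Set.add s assetname))
      PySem.Dict.empty assetnames)
      = List.foldl (fun d a => d.modify (pvDirOf a) PySem.Set.empty (fun s => PySem.Set.add s a))
          PySem.Dict.empty assetnames := by
    congr 1
    funext d a
    exact pvStepA_eq_modify d a
  simp only [hstep]
  set dA := List.foldl (fun d a => d.modify (pvDirOf a) PySem.Set.empty (fun s => PySem.Set.add s a))
      PySem.Dict.empty assetnames with hdA
  have hkA : dA.keys = PySem.Set.ofList (assetnames.map pvDirOf) := by
    rw [hdA, PySem.Dict.keys_foldl_modify_key assetnames pvDirOf PySem.Set.empty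
      (fun _ a s => PySem.Set.add s a) PySem.Dict.empty]
    exact PySem.Set.update_empty _
  have hndA : dA.keys.Nodup := by rw [hkA]; exact PySem.Set.nodup_ofList _
  rw [PySem.Dict.items_eq_map_keys dA hndA PySem.Set.empty, hkA, List.map_map]
  refine List.map_congr_left (fun k _ => ?_)
  simp only [Function.comp]
  rw [hdA, pvAfold_getD, PySem.Dict.getD_empty, PySem.Set.update_empty]

-- ---- B side ----

-- abbreviation for B's loop body
def pvStepB (d : PySem.Dict String (List String)) (name : String) : PySem.Dict String (List String) :=
  let path := pvDirOf name
  match d.get? path with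
  | none => d.insert path [name]
  | some bucket =>
    let i := pvScan bucket name 0
    if i == bucket.length || !(bucket.getD i "" == name)
    then d.insert path (PySem.List.insert bucket (i : Int) name)
    else d

-- the scan loop counts the strict-lower prefix
theorem pvScan_eq (b : List String) (a : String) :
    ∀ (n i : Nat), b.length - i = n →
      pvScan b a i = i + ((b.drop i).takeWhile (fun x => decide (x < a))).length := by
  intro n
  induction n with
  | zero =>
    intro i hi
    rw [pvScan]
    have h1 : ¬ i < b.length := by omega
    rw [dif_neg h1]
    simp [List.drop_eq_nil_of_le (by omega : b.length ≤ i)]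
  | succ n ih =>
    intro i hi
    have hlt : i < b.length := by omega
    have hdrop : b.drop i = b[i] :: b.drop (i + 1) := List.drop_eq_getElem_cons hlt
    have hgetD : b.getD i "" = b[i] := List.getD_eq_getElem b "" hlt
    rw [pvScan, dif_pos hlt, hgetD]
    by_cases hcmp : b[i] < a
    · rw [if_pos hcmp, ih (i + 1) (by omega), hdrop]
      simp only [List.takeWhile_cons, decide_eq_true hcmp, if_true, List.length_cons]
      omega
    · rw [if_neg hcmp, hdrop]
      simp only [List.takeWhile_cons, decide_eq_false hcmp, Bool.false_eq_true, if_false,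
        List.length_nil]
      omega

-- the bucket update of B's loop: correct ordered duplicate-free insertion
theorem pvBucketStep (b : List String) (a : String) (hs : b.Pairwise (· < ·)) :
    (if pvScan b a 0 == b.length || !(b.getD (pvScan b a 0) "" == a)
     then PySem.List.insert b ((pvScan b a 0 : Nat) : Int) a else b).Pairwise (· < ·)
    ∧ (if pvScan b a 0 == b.length || !(b.getD (pvScan b a 0) "" == a)
       then PySem.List.insert b ((pvScan b a 0 : Nat) : Int) a else b).Perm (PySem.Set.add b a) := by
  have hscan : pvScan b a 0 = (b.takeWhile (fun x => decide (x < a))).length := by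
    simpa using pvScan_eq b a b.length 0 rfl
  set t := b.takeWhile (fun x => decide (x < a)) with ht
  set r := b.dropWhile (fun x => decide (x < a)) with hr
  have hsplit : t ++ r = b := List.takeWhile_append_dropWhile
  have htlt : ∀ x ∈ t, x < a := by
    intro x hx
    simpa using List.mem_takeWhile_imp hx
  simp only [hscan]
  match hrc : r with
  | [] =>
    have hb : b = t := by rw [← hsplit, List.append_nil]
    have hlen : t.length = b.length := by rw [hb]
    have hcond : (t.length == b.length) = true := by simp [hlen]
    have hins : PySem.List.insert b (t.length : Int) a = b ++ [a] := by
      rw [PySem.List.insert_natCast b t.length a (by omega)]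
      simp [hlen]
    simp only [hcond, Bool.true_or, if_true, hins]
    constructor
    · rw [List.pairwise_append]
      refine ⟨hs, List.pairwise_singleton _ _, fun x hx y hy => ?_⟩
      rw [List.mem_singleton] at hy
      subst hy
      exact htlt x (hb ▸ hx)
    · have hnotmem : a ∉ b := fun hmem => lt_irrefl a (htlt a (hb ▸ hmem))
      have hadd : PySem.Set.add b a = b ++ [a] := by
        simp only [PySem.Set.add, PySem.Set.contains]
        rw [if_neg (by simpa using hnotmem)]
      rw [hadd]
  | h :: rs =>
    have hb : b = t ++ h :: rs := hsplit.symm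
    have hlen : t.length < b.length := by rw [hb]; simp
    have hcond : (t.length == b.length) = false := by simp; omega
    have hha : ¬ h < a := by
      have hd : List.dropWhile (fun x => decide (x < a)) b = h :: rs := hr.symm
      have h2 : (b.dropWhile (fun x => decide (x < a))).head (by rw [hd]; simp) = h := by
        have h3 : (List.dropWhile (fun x => decide (x < a)) b).head? = some h := by rw [hd]; rfl
        have h4 := List.head?_eq_some_head (l := List.dropWhile (fun x => decide (x < a)) b) (by rw [hd]; simp)
        exact Option.some.inj (h4.symm.trans h3)
      have h0 := List.head_dropWhile_not (fun x => decide (x < a)) (l := b) (by rw [hd]; simp)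
      rw [h2] at h0
      simpa using h0
    have hgetD : b.getD t.length "" = h := by
      rw [hb]
      simp [List.getD_eq_getElem?_getD]
    have hs' : (t ++ h :: rs).Pairwise (· < ·) := hb ▸ hs
    obtain ⟨htpw, hrpw, hcross⟩ := List.pairwise_append.mp hs'
    by_cases heq : h = a
    · -- name already present: else branch, bucket unchanged
      have hcond2 : (b.getD t.length "" == a) = true := by rw [hgetD]; simp [heq]
      simp only [hcond, Bool.false_or, hcond2, Bool.not_true, Bool.false_eq_true, if_false]
      refine ⟨hs, ?_⟩
      have hmem : a ∈ b := by
        rw [hb, ← heq]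
        exact List.mem_append_right _ (List.mem_cons_self)
      have hadd : PySem.Set.add b a = b := by
        simp only [PySem.Set.add, PySem.Set.contains]
        rw [if_pos (by simpa using hmem)]
      rw [hadd]
    · -- strict insertion between the lower prefix and the rest
      have hal : a < h := lt_of_le_of_ne (not_lt.mp hha) (fun he => heq he.symm)
      have hcond2 : (b.getD t.length "" == a) = false := by rw [hgetD]; simp [heq]
      simp only [hcond, Bool.false_or, hcond2, Bool.not_false, if_true]
      have hins : PySem.List.insert b (t.length : Int) a = t ++ a :: h :: rs := by
        rw [PySem.List.insert_natCast b t.length a (le_of_lt hlen), hb,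
          List.take_left, List.drop_left]
      rw [hins]
      have hhrs : ∀ y ∈ rs, h < y := (List.pairwise_cons.mp hrpw).1
      constructor
      · rw [List.pairwise_append]
        refine ⟨htpw, ?_, ?_⟩
        · rw [List.pairwise_cons]
          refine ⟨fun y hy => ?_, hrpw⟩
          rcases List.mem_cons.mp hy with rfl | hy'
          · exact hal
          · exact lt_trans hal (hhrs y hy')
        · intro x hx y hy
          rcases List.mem_cons.mp hy with rfl | hy'
          · exact htlt x hx
          · exact hcross x hx y hy'
      · have hnotmem : a ∉ b := by
          rw [hb]
          intro hmem
          rcases List.mem_append.mp hmem with hx | hx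
          · exact lt_irrefl a (htlt a hx)
          · rcases List.mem_cons.mp hx with he | hx'
            · exact heq he.symm
            · exact lt_irrefl a (lt_trans hal (hhrs a hx'))
        have hadd : PySem.Set.add b a = b ++ [a] := by
          simp only [PySem.Set.add, PySem.Set.contains]
          rw [if_neg (by simpa using hnotmem)]
        rw [hadd, hb]
        exact List.perm_middle.trans (List.perm_append_singleton a _).symm

-- dedup of an appended element
theorem pvOfList_append_singleton (l : List String) (x : String) :
    PySem.Set.ofList (l ++ [x]) = PySem.Set.add (PySem.Set.ofList l) x := by
  simp [PySem.Set.ofList_eq_foldl, List.foldl_append]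

-- Set.add respects permutation of the base list
theorem pvAddPerm {b c : List String} (x : String) (h : b.Perm c) :
    (PySem.Set.add b x).Perm (PySem.Set.add c x) := by
  simp only [PySem.Set.add, PySem.Set.contains]
  by_cases hm : x ∈ b
  · rw [if_pos (by simpa using hm), if_pos (by simpa using h.mem_iff.mp hm)]
    exact h
  · rw [if_neg (by simpa using hm), if_neg (by simpa using fun hc => hm (h.mem_iff.mpr hc))]
    exact h.append_right [x]

theorem pvSortedSingleton (x : String) : PySem.List.sorted [x] (fun y => y) false = [x] :=
  PySem.List.sorted_eq_of_perm_of_pairwise_lt _ _ _ (List.Perm.refl _) (List.pairwise_singleton _ _)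

-- one step of B's loop preserves the invariant
theorem pvStepB_inv (pre : List String) (d : PySem.Dict String (List String)) (a : String)
    (hkeys : d.keys = PySem.Set.ofList (pre.map pvDirOf))
    (hget : ∀ k, d.getD k [] = PySem.List.sorted (PySem.Set.ofList (pre.filter (fun m => pvDirOf m == k))) (fun x => x) false) :
    (pvStepB d a).keys = PySem.Set.ofList ((pre ++ [a]).map pvDirOf)
    ∧ ∀ k, (pvStepB d a).getD k []
        = PySem.List.sorted (PySem.Set.ofList ((pre ++ [a]).filter (fun m => pvDirOf m == k))) (fun x => x) false := by
  have hmapapp : (pre ++ [a]).map pvDirOf = pre.map pvDirOf ++ [pvDirOf a] := by simp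
  rw [hmapapp, pvOfList_append_singleton]
  cases hg : d.get? (pvDirOf a) with
  | none =>
    have hnk : pvDirOf a ∉ d.keys := (PySem.Dict.get?_eq_none_iff_not_mem_keys d _).mp hg
    have hnc : d.contains (pvDirOf a) = false := by
      rw [← Bool.not_eq_true, PySem.Dict.contains_iff_mem_keys]
      exact hnk
    have hstep : pvStepB d a = d.insert (pvDirOf a) [a] := by
      simp [pvStepB, hg]
    have hnm : (PySem.Set.ofList (pre.map pvDirOf)).contains (pvDirOf a) = false := by
      rw [← Bool.not_eq_true, PySem.Set.contains_iff, PySem.Set.mem_ofList]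
      rw [hkeys] at hnk
      simpa [PySem.Set.mem_ofList] using hnk
    have hfilnil : pre.filter (fun m => pvDirOf m == pvDirOf a) = [] := by
      rw [List.filter_eq_nil_iff]
      intro m hm hdm
      refine hnk ?_
      rw [hkeys, PySem.Set.mem_ofList]
      exact List.mem_map.mpr ⟨m, hm, by simpa using hdm⟩
    constructor
    · rw [hstep, PySem.Dict.keys_insert_of_not_contains d [a] hnc, hkeys]
      simp only [PySem.Set.add, hnm, Bool.false_eq_true, if_false]
    · intro k
      by_cases hk : k = pvDirOf a
      · subst hk
        rw [hstep, PySem.Dict.getD_insert_self d _ [a] [], List.filter_append, hfilnil]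
        simp only [List.nil_append, List.filter_cons, beq_self_eq_true, if_pos, List.filter_nil]
        exact (pvSortedSingleton a).symm
      · rw [hstep, PySem.Dict.getD_insert_of_ne d [a] [] hk, hget k, List.filter_append]
        have : [a].filter (fun m => pvDirOf m == k) = [] := by
          simp only [List.filter_cons, List.filter_nil]
          rw [if_neg (fun hbeq => hk (eq_of_beq hbeq).symm)]
        rw [this, List.append_nil]
  | some bucket =>
    have hgd : d.getD (pvDirOf a) [] = bucket := PySem.Dict.getD_of_get?_eq_some d [] hg
    have hbucket : bucket = PySem.List.sorted (PySem.Set.ofList (pre.filter (fun m => pvDirOf m == pvDirOf a))) (fun x => x) false := by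
      rw [← hgd, hget]
    have hsorted : bucket.Pairwise (· < ·) := by
      rw [hbucket]; exact PySem.List.sorted_ofList_pairwise_lt _
    have hperm : bucket.Perm (PySem.Set.ofList (pre.filter (fun m => pvDirOf m == pvDirOf a))) := by
      rw [hbucket]; exact PySem.List.sorted_perm _ _ _
    have hc : d.contains (pvDirOf a) = true := by
      rw [PySem.Dict.contains_eq_isSome_get?, hg]; rfl
    have hmem : pvDirOf a ∈ PySem.Set.ofList (pre.map pvDirOf) := by
      rw [← hkeys]
      exact (PySem.Dict.contains_iff_mem_keys d _).mp hc
    obtain ⟨hnewpw, hnewperm⟩ := pvBucketStep bucket a hsorted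
    have hkeyset : PySem.Set.add (PySem.Set.ofList (pre.map pvDirOf)) (pvDirOf a)
        = PySem.Set.ofList (pre.map pvDirOf) := by
      simp only [PySem.Set.add]
      rw [if_pos (by rw [PySem.Set.contains_iff]; exact hmem)]
    have hforkA : ∀ k, k ≠ pvDirOf a →
        ([a].filter (fun m => pvDirOf m == k)) = [] := by
      intro k hk
      simp only [List.filter_cons, List.filter_nil]
      rw [if_neg (fun hbeq => hk (eq_of_beq hbeq).symm)]
    by_cases hcond : (pvScan bucket a 0 == bucket.length || !(bucket.getD (pvScan bucket a 0) "" == a)) = true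
    · rw [if_pos hcond] at hnewpw hnewperm
      have hstep : pvStepB d a
          = d.insert (pvDirOf a) (PySem.List.insert bucket ((pvScan bucket a 0 : Nat) : Int) a) := by
        simp only [pvStepB, hg]
        split
        · rfl
        · next h => exact absurd hcond h
      constructor
      · rw [hstep, PySem.Dict.keys_insert_of_contains d _ hc, hkeys, hkeyset]
      · intro k
        by_cases hk : k = pvDirOf a
        · subst hk
          rw [hstep, PySem.Dict.getD_insert_self, List.filter_append]
          have hfa : [a].filter (fun m => pvDirOf m == pvDirOf a) = [a] := by
            simp
          rw [hfa, pvOfList_append_singleton]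
          exact (PySem.List.sorted_eq_of_perm_of_pairwise_lt _ _ _
            (hnewperm.trans (pvAddPerm a hperm)) hnewpw).symm
        · rw [hstep, PySem.Dict.getD_insert_of_ne d _ [] hk, hget k, List.filter_append,
            hforkA k hk, List.append_nil]
    · have hcond' : (pvScan bucket a 0 == bucket.length || !(bucket.getD (pvScan bucket a 0) "" == a)) = false := by
        simpa using hcond
      rw [if_neg hcond] at hnewpw hnewperm
      have hstep : pvStepB d a = d := by
        simp only [pvStepB, hg]
        split
        · next h => rw [hcond'] at h; exact absurd h (by simp)
        · rfl
      constructor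
      · rw [hstep, hkeys, hkeyset]
      · intro k
        by_cases hk : k = pvDirOf a
        · subst hk
          rw [hstep, hgd, List.filter_append]
          have hfa : [a].filter (fun m => pvDirOf m == pvDirOf a) = [a] := by
            simp
          rw [hfa, pvOfList_append_singleton]
          exact (PySem.List.sorted_eq_of_perm_of_pairwise_lt _ _ _
            (hnewperm.trans (pvAddPerm a hperm)) hnewpw).symm
        · rw [hstep, hget k, List.filter_append, hforkA k hk, List.append_nil]

-- B's fold invariant: keys are the directories in first-appearance order, each bucket is its canonical sorted set
theorem pvInv (rest : List String) : ∀ (pre : List String) (d : PySem.Dict String (List String)),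
    d.keys = PySem.Set.ofList (pre.map pvDirOf) →
    (∀ k, d.getD k [] = PySem.List.sorted (PySem.Set.ofList (pre.filter (fun a => pvDirOf a == k))) (fun x => x) false) →
    (rest.foldl pvStepB d).keys = PySem.Set.ofList ((pre ++ rest).map pvDirOf)
    ∧ ∀ k, (rest.foldl pvStepB d).getD k []
        = PySem.List.sorted (PySem.Set.ofList ((pre ++ rest).filter (fun a => pvDirOf a == k))) (fun x => x) false := by
  induction rest with
  | nil =>
    intro pre d h1 h2
    simp only [List.append_nil]
    exact ⟨h1, h2⟩
  | cons a rest ih =>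
    intro pre d h1 h2
    obtain ⟨h1', h2'⟩ := pvStepB_inv pre d a h1 h2
    rw [List.foldl_cons, show pre ++ a :: rest = (pre ++ [a]) ++ rest by simp]
    exact ih (pre ++ [a]) (pvStepB d a) h1' h2'

-- B equals the normal form
theorem pvB_canon (xs : List String) : group_levels_by_directory_py_alt xs = pvCanon xs := by
  have hfold : (xs.foldl
      (fun d name =>
        let path := pvDirOf name
        match d.get? path with
        | none => d.insert path [name]
        | some bucket =>
          let i := pvScan bucket name 0
          if i == bucket.length || !(bucket.getD i "" == name)
          then d.insert path (PySem.List.insert bucket (i : Int) name)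
          else d)
      PySem.Dict.empty) = xs.foldl pvStepB PySem.Dict.empty := rfl
  have hinv := pvInv xs [] PySem.Dict.empty (by rfl) (fun k => by rfl)
  unfold group_levels_by_directory_py_alt pvCanon
  rw [hfold]
  have hnd : (xs.foldl pvStepB PySem.Dict.empty).keys.Nodup := by
    rw [hinv.1]; exact PySem.Set.nodup_ofList _
  rw [PySem.Dict.items_eq_map_keys _ hnd [], hinv.1]
  simp only [List.nil_append] at *
  exact List.map_congr_left (fun k _ => by rw [hinv.2 k])

-- ===== VERDICT (by name: the statement is the Claim_ definition above) =====
theorem group_levels_by_directory_py_spec : Claim_equal_group_levels_by_directory_py := by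
  intro assetnames _
  unfold Spec_group_levels_by_directory_py
  rw [pvA_canon, pvB_canon]
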